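-- pv_equiv track=rewrite | github.com/Jxshyz/Gesture_Recognition | utils/phone_keyboard_control.py | _pick_default_serial
-- ===== SOURCE A (Python) =====
-- from typing import Optional, List, Tuple
--
-- def _pick_default_serial(devs: List[Tuple[str, str]]) -> Optional[str]:
--     # prefer real device (not emulator) with status=device
--     real = [s for s, st in devs if st == "device" and not s.startswith("emulator-")]
--     if real:
--         return real[0]
--     any_dev = [s for s, st in devs if st == "device"]
--     if any_dev:
--         return any_dev[0]
--     return None
-- ===== SOURCE B (Python) =====
-- from typing import Optional, List, Tuple
--
-- def _pick_default_serial(devs: List[Tuple[str, str]]) -> Optional[str]: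
--     # single pass, two running candidates, early exit on first real device
--     first_real = None
--     first_any = None
--     for s, st in devs:
--         if st == "device":
--             if first_any is None:
--                 first_any = s
--             if not s.startswith("emulator-"):
--                 first_real = s
--                 break
--     return first_real if first_real is not None else first_any
-- ===== Notes on version B (the rewrite author's own statement) =====
-- stated objective: alternative
-- what changed: Replaces A's two full list comprehensions with a single pass keeping two running candidates (first real device, first any device) and exiting early once a real device is found.
import Mathlib
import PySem

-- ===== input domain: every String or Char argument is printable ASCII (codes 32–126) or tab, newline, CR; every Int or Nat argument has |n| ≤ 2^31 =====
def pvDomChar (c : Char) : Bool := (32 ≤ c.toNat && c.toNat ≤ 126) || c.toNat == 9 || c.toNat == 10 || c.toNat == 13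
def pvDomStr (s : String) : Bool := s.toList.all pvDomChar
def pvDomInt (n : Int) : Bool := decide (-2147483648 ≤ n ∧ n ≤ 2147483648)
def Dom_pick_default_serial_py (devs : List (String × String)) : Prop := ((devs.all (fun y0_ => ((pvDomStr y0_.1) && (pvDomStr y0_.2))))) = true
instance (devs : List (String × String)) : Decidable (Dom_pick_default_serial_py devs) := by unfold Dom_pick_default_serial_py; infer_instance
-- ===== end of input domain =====

-- B replaces A's two list comprehensions with one single-pass loop holding two running candidates (alternative decomposition, same cost).
-- ===== PORT A =====
-- prefer real device (not emulator) with status=device; two comprehensions, as in A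
def pick_default_serial_py (devs : List (String × String)) : Option String :=
  let real := devs.filterMap (fun p =>
    if p.2 == "device" && !(PySem.Str.startswith p.1 "emulator-") then some p.1 else none)
  match real with
  | r :: _ => some r
  | [] =>
    let any_dev := devs.filterMap (fun p => if p.2 == "device" then some p.1 else none)
    match any_dev with
    | a :: _ => some a
    | [] => none

-- ===== PORT B =====
-- single pass with two running candidates and early exit (B's loop)
def pickGo : List (String × String) → Option String → Option String
  | [], firstAny => firstAny
  | (s, st) :: t, firstAny =>
    if st == "device" then
      let firstAny' := if firstAny = none then some s else firstAny
      if !(PySem.Str.startswith s "emulator-") then some s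
      else pickGo t firstAny'
    else pickGo t firstAny

def pick_default_serial_py_alt (devs : List (String × String)) : Option String :=
  pickGo devs none

-- ===== PRECONDITION & SPEC =====
def Spec_pick_default_serial_py (devs : List (String × String)) (out : Option String) : Prop := out = pick_default_serial_py_alt devs
instance (devs : List (String × String)) (out : Option String) : Decidable (Spec_pick_default_serial_py devs out) := by unfold Spec_pick_default_serial_py; infer_instance

-- ===== CLAIM (what is proved, stated in full; the proofs are below) =====
def Claim_equal_pick_default_serial_py : Prop := ∀ (devs : List (String × String)), Dom_pick_default_serial_py devs → Spec_pick_default_serial_py devs (pick_default_serial_py devs)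

-- ===== LEMMAS AND PROOFS =====

-- ===== VERDICT (by name: the statement is the Claim_ definition above) =====
theorem pickGo_spec (devs : List (String × String)) (acc : Option String) :
    pickGo devs acc =
      (devs.filterMap (fun p =>
        if p.2 == "device" && !(PySem.Str.startswith p.1 "emulator-") then some p.1 else none)).head?.or
      (acc.or
        (devs.filterMap (fun p => if p.2 == "device" then some p.1 else none)).head?) := by
  induction devs generalizing acc with
  | nil => simp [pickGo]
  | cons h t ih =>
    obtain ⟨s, st⟩ := h
    by_cases hd : st = "device"
    · cases he : PySem.Str.startswith s "emulator-" with
      | true =>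
        simp at he
        cases acc <;> simp [pickGo, hd, he, ih, Option.or]
      | false =>
        simp at he
        cases acc <;> simp [pickGo, hd, he, Option.or]
    · simp [pickGo, hd, ih]

theorem pick_default_serial_py_spec : Claim_equal_pick_default_serial_py := by
  intro devs _
  unfold Spec_pick_default_serial_py pick_default_serial_py pick_default_serial_py_alt
  rw [pickGo_spec]
  cases hr : devs.filterMap (fun p =>
      if p.2 == "device" && !(PySem.Str.startswith p.1 "emulator-") then some p.1 else none) with
  | cons r t => simp
  | nil =>
    cases ha : devs.filterMap (fun p => if p.2 == "device" then some p.1 else none) with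
    | cons a t => simp [Option.or]
    | nil => simp [Option.or]
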